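-- pv_equiv track=rewrite | github.com/sidou06/hackerrank-solutions | Mathematics/Fundamentals/Jim and the Jokes/Solution.py | solve
-- ===== SOURCE A (Python) =====
-- def verif_date(m, d):
--     # Checks if both digits of the day (d) are less than the month (m)
--     if d % 10 < m and d // 10 < m:
--         return True
--     else:
--         return False
--
-- def transform_date(m, d):
--     # Transforms the date into a unique number based on the month (m) and day (d)
--     return d % 10 + (d // 10) * m
--
-- def solve(dates):
--     # Dictionary to store transformed date occurrences
--     dict = {}
--     tot = 0
--
--     # Iterate through the list of dates
--     for date in dates:
--         if verif_date(date[0], date[1]):  # Check if the date meets the condition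
--             nb = transform_date(date[0], date[1])  # Transform the date
--             if nb in dict:
--                 dict[nb] += 1  # Increment count if already present
--             else:
--                 dict[nb] = 1  # Initialize count if not present
--
--     # Calculate the number of valid date pairs
--     for ele in dict:
--         a = dict[ele]
--         tot += (a * (a - 1)) // 2  # Compute pair count using nC2 formula
--
--     return tot
-- ===== SOURCE B (Python) =====
-- def solve(dates):
--     # Sort the valid transformed values; equal values become adjacent,
--     # so pairs can be counted by scanning runs of the sorted list.
--     vals = sorted(d % 10 + (d // 10) * m for m, d in dates if d % 10 < m and d // 10 < m)
--     tot = 0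
--     run = 0
--     prev = None
--     for v in vals:
--         if v == prev:
--             run += 1
--         else:
--             run = 0
--         tot += run
--         prev = v
--     return tot
-- ===== Notes on version B (the rewrite author's own statement) =====
-- stated objective: alternative
-- what changed: Replaces A's hash-map counting plus a second nC2 pass over the dict by sorting the valid transformed values and counting pairs in one scan over runs of equal adjacent values.
import Mathlib
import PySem

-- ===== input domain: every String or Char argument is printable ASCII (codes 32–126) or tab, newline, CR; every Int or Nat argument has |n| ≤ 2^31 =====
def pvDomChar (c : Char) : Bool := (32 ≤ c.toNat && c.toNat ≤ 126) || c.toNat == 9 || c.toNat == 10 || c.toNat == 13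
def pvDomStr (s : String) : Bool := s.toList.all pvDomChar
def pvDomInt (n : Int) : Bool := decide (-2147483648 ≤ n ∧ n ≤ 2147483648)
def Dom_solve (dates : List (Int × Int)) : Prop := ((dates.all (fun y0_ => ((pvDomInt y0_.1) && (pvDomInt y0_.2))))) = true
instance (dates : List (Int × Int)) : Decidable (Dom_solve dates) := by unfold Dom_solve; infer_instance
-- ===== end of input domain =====

-- B replaces A's hash-map counting + second nC2 pass over the dict by sorting the valid
-- transformed values and counting pairs in one scan over runs of equal adjacent values.

-- ===== PORT A =====
def verifDate (m d : Int) : Bool :=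
  if PySem.Int.mod d 10 < m ∧ PySem.Int.floordiv d 10 < m then true else false

def transformDate (m d : Int) : Int :=
  PySem.Int.mod d 10 + PySem.Int.floordiv d 10 * m

def solve (dates : List (Int × Int)) : Int :=
  let dict := dates.foldl (fun dict date =>
    if verifDate date.1 date.2 then
      let nb := transformDate date.1 date.2
      if dict.contains nb then
        dict.insert nb (dict.getD nb 0 + 1)   -- dict[nb] += 1 (key present)
      else
        dict.insert nb 1
    else dict) (PySem.Dict.empty : PySem.Dict Int Int)
  -- second loop: for ele in dict; dict[ele] always present, ported as getD _ 0
  dict.keys.foldl (fun tot ele =>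
    let a := dict.getD ele 0
    tot + PySem.Int.floordiv (a * (a - 1)) 2) 0

-- ===== PORT B =====
def solve_alt (dates : List (Int × Int)) : Int :=
  let vals := PySem.List.sorted (dates.filterMap (fun p =>
      if PySem.Int.mod p.2 10 < p.1 ∧ PySem.Int.floordiv p.2 10 < p.1
      then some (PySem.Int.mod p.2 10 + PySem.Int.floordiv p.2 10 * p.1) else none))
    (fun x => x) false
  (vals.foldl (fun (st : Int × Int × Option Int) v =>
      let run := if st.2.2 = some v then st.2.1 + 1 else 0
      (st.1 + run, run, some v)) (0, 0, none)).1

-- ===== PRECONDITION & SPEC =====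
def Spec_solve (dates : List (Int × Int)) (out : Int) : Prop := out = solve_alt dates
instance (dates : List (Int × Int)) (out : Int) : Decidable (Spec_solve dates out) := by unfold Spec_solve; infer_instance

-- ===== CLAIM (what is proved, stated in full; the proofs are below) =====
def Claim_equal_solve : Prop := ∀ (dates : List (Int × Int)), Dom_solve dates → Spec_solve dates (solve dates)

-- ===== LEMMAS AND PROOFS =====

-- number of equal pairs in a list, counted element-by-element
def pairs : List Int → Int
  | [] => 0
  | x :: xs => (xs.count x : Int) + pairs xs

-- nC2 as A computes it
def c2 (a : Int) : Int := PySem.Int.floordiv (a * (a - 1)) 2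

-- the sum A's second loop computes, as a function of the dict
def S (d : PySem.Dict Int Int) : Int := (d.keys.map (fun k => c2 (d.getD k 0))).sum

lemma c2_succ (v : Int) : c2 (v + 1) = c2 v + v := by
  unfold c2
  rw [PySem.Int.floordiv_eq_ediv_of_pos (by norm_num), PySem.Int.floordiv_eq_ediv_of_pos (by norm_num)]
  have h1 : (v + 1) * ((v + 1) - 1) = v * v + v := by ring
  have h2 : v * (v - 1) = v * v - v := by ring
  obtain ⟨k, hk⟩ := Int.even_mul_succ_self v
  have hk' : v * v + v = k + k := by nlinarith [hk]
  rw [h1, h2]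
  omega

lemma c2_one : c2 1 = 0 := by decide

-- sum over a nodup key list when exactly one key's value changes
lemma sum_update (x : Int) : ∀ (ks : List Int), ks.Nodup → x ∈ ks →
    ∀ f g : Int → Int, (∀ k ∈ ks, k ≠ x → f k = g k) →
    (ks.map f).sum = (ks.map g).sum + (f x - g x) := by
  intro ks
  induction ks with
  | nil => intro _ h; cases h
  | cons k ks ih =>
    intro hnd hx f g hfg
    rcases List.mem_cons.mp hx with rfl | hx'
    · have hks : ks.map f = ks.map g := by
        apply List.map_congr_left
        intro a ha
        exact hfg a (List.mem_cons_of_mem _ ha) (fun h => (List.nodup_cons.mp hnd).1 (h ▸ ha))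
      simp [hks]; ring
    · have hk : f k = g k := hfg k (List.mem_cons_self) (fun h => (List.nodup_cons.mp hnd).1 (h ▸ hx'))
      have := ih (List.nodup_cons.mp hnd).2 hx' f g (fun a ha h => hfg a (List.mem_cons_of_mem _ ha) h)
      simp [hk, this]; ring

-- effect of one counting step on A's final sum
lemma S_step (d : PySem.Dict Int Int) (x : Int) (hnd : d.keys.Nodup) :
    S (d.insert x (d.getD x 0 + 1)) = S d + d.getD x 0 := by
  by_cases hc : d.contains x = true
  · have hkeys := PySem.Dict.keys_insert_of_contains d (d.getD x 0 + 1) hc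
    have hx : x ∈ d.keys := (PySem.Dict.contains_iff_mem_keys d x).mp hc
    unfold S
    rw [hkeys]
    rw [sum_update x d.keys hnd hx _ (fun k => c2 (d.getD k 0))
      (fun k _ hk => by rw [PySem.Dict.getD_insert_of_ne d (d.getD x 0 + 1) 0 hk])]
    rw [PySem.Dict.getD_insert_self d x (d.getD x 0 + 1) 0, c2_succ]
    ring
  · have hc' : d.contains x = false := by simpa using hc
    have hkeys := PySem.Dict.keys_insert_of_not_contains d (d.getD x 0 + 1) hc'
    have hx : x ∉ d.keys := fun h => by
      simp [(PySem.Dict.contains_iff_mem_keys d x).mpr h] at hc'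
    have h0 : d.getD x 0 = 0 := PySem.Dict.getD_of_not_contains d 0 hc'
    unfold S
    rw [hkeys, List.map_append, List.sum_append]
    have hmap : d.keys.map (fun k => c2 ((d.insert x (d.getD x 0 + 1)).getD k 0))
        = d.keys.map (fun k => c2 (d.getD k 0)) := by
      apply List.map_congr_left
      intro a ha
      have hne : a ≠ x := fun h => hx (h ▸ ha)
      rw [PySem.Dict.getD_insert_of_ne d (d.getD x 0 + 1) 0 hne]
    rw [hmap]
    simp only [List.map_cons, List.map_nil, List.sum_cons, List.sum_nil]
    rw [PySem.Dict.getD_insert_self d x (d.getD x 0 + 1) 0, h0]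
    norm_num [c2_one]

-- splitting off an indicator from a summed map
lemma sum_shift (x : Int) (f : Int → Int) : ∀ (l : List Int),
    (l.map (fun y => f y + (if y = x then 1 else 0))).sum = (l.map f).sum + (l.count x : Int) := by
  intro l
  induction l with
  | nil => simp
  | cons b l ihl =>
    simp only [List.map_cons, List.sum_cons, List.count_cons, ihl]
    by_cases hb : b = x
    · have : (x == b) = true := by simp [hb.symm]
      simp [hb, this]; push_cast; ring
    · have : (x == b) = false := by simp [Ne.symm hb]
      simp [hb, this]; ring

-- getD after one counting insert
lemma getD_step (d : PySem.Dict Int Int) (x y : Int) :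
    (d.insert x (d.getD x 0 + 1)).getD y 0 = d.getD y 0 + (if y = x then 1 else 0) := by
  by_cases h : y = x
  · subst h; rw [PySem.Dict.getD_insert_self]; simp
  · rw [PySem.Dict.getD_insert_of_ne d _ 0 h]; simp [h]

-- A's nC2 sum of the dict built so far equals the running pair count
lemma S_fold : ∀ (l : List Int) (d : PySem.Dict Int Int), d.keys.Nodup →
    S (l.foldl (fun d x => d.insert x (d.getD x 0 + 1)) d)
    = S d + pairs l + (l.map (fun y => d.getD y 0)).sum := by
  intro l
  induction l with
  | nil => intro d _; simp [pairs]
  | cons x l ih =>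
    intro d hnd
    simp only [List.foldl_cons]
    rw [ih (d.insert x (d.getD x 0 + 1)) (PySem.Dict.nodup_keys_insert d x (d.getD x 0 + 1) hnd)]
    rw [S_step d x hnd]
    have hmap : l.map (fun y => (d.insert x (d.getD x 0 + 1)).getD y 0)
        = l.map (fun y => d.getD y 0 + (if y = x then 1 else 0)) := by
      apply List.map_congr_left; intro a _; exact getD_step d x a
    rw [hmap, sum_shift x (fun y => d.getD y 0) l]
    simp only [pairs, List.map_cons, List.sum_cons]
    ring

-- pairs is invariant under permutation
lemma pairs_perm : ∀ {l l' : List Int}, l.Perm l' → pairs l = pairs l' := by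
  intro l l' h
  induction h with
  | nil => rfl
  | cons x h ih => simp [pairs, ih, h.count_eq]
  | swap x y l =>
    simp only [pairs, List.count_cons]
    push_cast
    by_cases h : x = y <;> simp [h, beq_iff_eq, Ne.symm] <;> ring
  | trans _ _ ih1 ih2 => rw [ih1, ih2]

-- B's scan over a sorted tail computes the pair count
lemma scan_general : ∀ (l : List Int) (t r p : Int), l.Pairwise (· ≤ ·) → (∀ x ∈ l, p ≤ x) →
    (l.foldl (fun (st : Int × Int × Option Int) v =>
      let run := if st.2.2 = some v then st.2.1 + 1 else 0
      (st.1 + run, run, some v)) (t, r, some p)).1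
    = t + pairs l + (r + 1) * (l.count p : Int) := by
  intro l
  induction l with
  | nil => intro t r p _ _; simp [pairs]
  | cons v l ih =>
    intro t r p hpw hle
    have hpv : p ≤ v := hle v List.mem_cons_self
    have hvl : ∀ x ∈ l, v ≤ x := fun x hx => (List.pairwise_cons.mp hpw).1 x hx
    by_cases h : p = v
    · subst h
      simp only [List.foldl_cons, List.count_cons]
      have : (some p = some p) = True := by simp
      simp only [this, if_true]
      rw [ih (t + (r + 1)) (r + 1) p (List.pairwise_cons.mp hpw).2 hvl]
      simp only [pairs, beq_self_eq_true, if_true]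
      push_cast
      ring
    · have hcount : l.count p = 0 := by
        rw [List.count_eq_zero]
        intro hp
        exact absurd (hle v List.mem_cons_self) (by
          have := hvl p hp
          -- p ∈ l gives v ≤ p; with p ≤ v and p ≠ v, contradiction
          intro _; exact h (le_antisymm hpv this))
      simp only [List.foldl_cons]
      have hne : (some p = some v) = False := by simp [h]
      simp only [hne, if_false]
      rw [ih (t + 0) 0 v (List.pairwise_cons.mp hpw).2 hvl]
      simp only [pairs, List.count_cons, hcount]
      have h1 : (p == v) = false := by simp [h]
      have h2 : ¬ v = p := fun hh => h hh.symm
      simp [h1, h2]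
      ring

-- the full scan from the initial (0, 0, None) state
lemma scan_full (l : List Int) (h : l.Pairwise (· ≤ ·)) :
    (l.foldl (fun (st : Int × Int × Option Int) v =>
      let run := if st.2.2 = some v then st.2.1 + 1 else 0
      (st.1 + run, run, some v)) (0, 0, none)).1 = pairs l := by
  cases l with
  | nil => simp [pairs]
  | cons x xs =>
    simp only [List.foldl_cons]
    have h1 : ((none : Option Int) = some x) = False := by simp
    simp only [h1, if_false]
    rw [scan_general xs (0 + 0) 0 x (List.pairwise_cons.mp h).2 (List.pairwise_cons.mp h).1]
    simp only [pairs]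
    push_cast
    ring

-- A's conditional counting step is one uniform insert
lemma astep_eq (d : PySem.Dict Int Int) (nb : Int) :
    (if d.contains nb then d.insert nb (d.getD nb 0 + 1) else d.insert nb 1)
    = d.insert nb (d.getD nb 0 + 1) := by
  by_cases hc : d.contains nb = true
  · simp [hc]
  · have hc' : d.contains nb = false := by simpa using hc
    rw [if_neg hc, PySem.Dict.getD_of_not_contains d 0 hc']
    norm_num

-- fold over dates guarded by the validity test = fold over the valid transformed values
lemma foldl_if_filterMap {σ : Type} (g : σ → Int → σ) :
    ∀ (l : List (Int × Int)) (s : σ),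
    l.foldl (fun s p => if verifDate p.1 p.2 then g s (transformDate p.1 p.2) else s) s
    = (l.filterMap (fun p => if verifDate p.1 p.2 then some (transformDate p.1 p.2) else none)).foldl g s := by
  intro l
  induction l with
  | nil => intro s; rfl
  | cons p l ih =>
    intro s
    by_cases hv : verifDate p.1 p.2 = true <;> simp [hv, ih]

-- second loop as the sum S
lemma foldl_add_map (f : Int → Int) : ∀ (ks : List Int) (t : Int),
    ks.foldl (fun t k => t + f k) t = t + (ks.map f).sum := by
  intro ks
  induction ks with
  | nil => intro t; simp
  | cons k ks ih => intro t; simp [ih]; ring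

-- B's inline guard/transform is A's helper pair
lemma bfilter_eq :
    (fun (p : Int × Int) =>
      if PySem.Int.mod p.2 10 < p.1 ∧ PySem.Int.floordiv p.2 10 < p.1
      then some (PySem.Int.mod p.2 10 + PySem.Int.floordiv p.2 10 * p.1) else none)
    = (fun (p : Int × Int) => if verifDate p.1 p.2 then some (transformDate p.1 p.2) else none) := by
  funext p
  unfold verifDate transformDate
  split_ifs with h1 h2 h3 <;> simp_all

-- ===== VERDICT (by name: the statement is the Claim_ definition above) =====
theorem solve_spec : Claim_equal_solve := by
  intro dates _
  unfold Spec_solve solve solve_alt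
  rw [bfilter_eq]
  have hA := foldl_if_filterMap (fun (d : PySem.Dict Int Int) nb =>
      if d.contains nb then d.insert nb (d.getD nb 0 + 1) else d.insert nb 1) dates PySem.Dict.empty
  rw [hA, foldl_add_map]
  have hstep : (fun (d : PySem.Dict Int Int) nb =>
        if d.contains nb then d.insert nb (d.getD nb 0 + 1) else d.insert nb 1)
      = (fun (d : PySem.Dict Int Int) nb => d.insert nb (d.getD nb 0 + 1)) := by
    funext d nb; exact astep_eq d nb
  rw [hstep]
  have hSf := S_fold (dates.filterMap (fun p =>
      if verifDate p.1 p.2 then some (transformDate p.1 p.2) else none))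
    PySem.Dict.empty PySem.Dict.nodup_keys_empty
  have hSe : S PySem.Dict.empty = 0 := by simp [S, PySem.Dict.keys_empty]
  have hmap0 : ((dates.filterMap (fun p =>
        if verifDate p.1 p.2 then some (transformDate p.1 p.2) else none)).map
      (fun y => (PySem.Dict.empty : PySem.Dict Int Int).getD y 0)).sum = 0 := by
    have h0 : ∀ y : Int, (PySem.Dict.empty : PySem.Dict Int Int).getD y 0 = 0 := fun y =>
      PySem.Dict.getD_of_not_contains _ 0 (by simp [PySem.Dict.contains, PySem.Dict.empty])
    simp [h0]
  rw [hSe, hmap0] at hSf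
  have hB := scan_full (PySem.List.sorted (dates.filterMap (fun p =>
      if verifDate p.1 p.2 then some (transformDate p.1 p.2) else none)) (fun x => x) false)
    (by simpa using PySem.List.sorted_pairwise _ (fun x => x))
  have hperm : pairs (PySem.List.sorted (dates.filterMap (fun p =>
        if verifDate p.1 p.2 then some (transformDate p.1 p.2) else none)) (fun x => x) false)
      = pairs (dates.filterMap (fun p =>
        if verifDate p.1 p.2 then some (transformDate p.1 p.2) else none)) :=
    pairs_perm (PySem.List.sorted_perm _ (fun x => x) false)
  rw [hB, hperm]
  unfold S c2 at hSf
  simpa using hSf
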